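-- pv_equiv track=rewrite | github.com/mckenziewest/advent_of_code_2022 | day_9/solution.py | move_T
-- ===== SOURCE A (Python) =====
-- def add_tuples(tup_1,tup_2):
--     return tuple(tup_1[i]+tup_2[i] for i in range(len(tup_1)))
--
-- def move_T(H,T):
--     diagonal_moves = [(1,1),(1,-1),(-1,1),(-1,-1)]
--     straight_moves = [(0,1),(0,-1),(-1,0),(1,0),(0,0)]
--     touches_H = [add_tuples(H,v) for v in straight_moves]
--     surrounds_H = [add_tuples(H,v) for v in diagonal_moves+straight_moves]
--     if T in surrounds_H:
--         return T
--     else: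
--         for v in straight_moves + diagonal_moves:
--             temp_T = add_tuples(T,v)
--             if temp_T in touches_H:
--                 return temp_T
--         for v in diagonal_moves:
--             temp_T = add_tuples(T,v)
--             if temp_T in surrounds_H:
--                 return temp_T
-- ===== SOURCE B (Python) =====
-- def move_T(H,T):
--     dx = H[0]-T[0]; dy = H[1]-T[1]
--     if abs(dx)<=1 and abs(dy)<=1: return T
--     if abs(dx)<=2 and abs(dy)<=2:
--         return (T[0]+(dx>0)-(dx<0), T[1]+(dy>0)-(dy<0))
--     return None
-- ===== Notes on version B (the rewrite author's own statement) =====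
-- stated objective: simpler
-- what changed: Replaced A's construction of candidate-move lists and two membership-search loops with a direct dx/dy sign computation: return T when Chebyshev distance <= 1, step T by (sgn dx, sgn dy) when <= 2, else None.
import Mathlib
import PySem

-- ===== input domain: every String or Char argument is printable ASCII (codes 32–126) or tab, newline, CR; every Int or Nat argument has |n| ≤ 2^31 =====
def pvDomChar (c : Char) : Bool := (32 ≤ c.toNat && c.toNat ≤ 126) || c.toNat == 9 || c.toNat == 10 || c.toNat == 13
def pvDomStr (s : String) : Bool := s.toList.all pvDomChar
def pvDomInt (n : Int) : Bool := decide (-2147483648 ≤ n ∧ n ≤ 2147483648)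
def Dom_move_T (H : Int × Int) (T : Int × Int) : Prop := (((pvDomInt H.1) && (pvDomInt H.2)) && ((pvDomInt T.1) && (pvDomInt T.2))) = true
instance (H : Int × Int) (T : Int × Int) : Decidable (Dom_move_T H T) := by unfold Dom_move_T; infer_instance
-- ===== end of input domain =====

-- B replaces A's candidate-move lists and membership-search loops with a direct
-- sign-based step from dx/dy (simpler; same O(1) cost).


-- ===== PORT A =====
-- add_tuples on pairs of ints (A only ever applies it to 2-tuples here)
def addTuples (a b : Int × Int) : Int × Int := (a.1 + b.1, a.2 + b.2)

-- 'for v in cands: temp_T = add_tuples(T, v); if temp_T in target: return temp_T'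
def moveLoop (T : Int × Int) (cands : List (Int × Int)) (target : List (Int × Int)) :
    Option (Int × Int) :=
  match cands with
  | [] => none
  | v :: rest =>
      let tempT := addTuples T v
      if tempT ∈ target then some tempT else moveLoop T rest target

def move_T (H : Int × Int) (T : Int × Int) : Option (Int × Int) :=
  let diagonalMoves : List (Int × Int) := [(1,1),(1,-1),(-1,1),(-1,-1)]
  let straightMoves : List (Int × Int) := [(0,1),(0,-1),(-1,0),(1,0),(0,0)]
  let touchesH := straightMoves.map (fun v => addTuples H v)
  let surroundsH := (diagonalMoves ++ straightMoves).map (fun v => addTuples H v)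
  if T ∈ surroundsH then
    some T
  else
    match moveLoop T (straightMoves ++ diagonalMoves) touchesH with
    | some r => some r
    | none => moveLoop T diagonalMoves surroundsH

-- ===== PORT B =====
def sgnB (x : Int) : Int := (if x > 0 then (1:Int) else 0) - (if x < 0 then (1:Int) else 0)

-- Python's abs() on an int, ported literally
def absI (x : Int) : Int := if x < 0 then -x else x

def move_T_alt (H : Int × Int) (T : Int × Int) : Option (Int × Int) :=
  let dx := H.1 - T.1
  let dy := H.2 - T.2
  if absI dx ≤ 1 ∧ absI dy ≤ 1 then some T
  else if absI dx ≤ 2 ∧ absI dy ≤ 2 then some (T.1 + sgnB dx, T.2 + sgnB dy)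
  else none

-- ===== PRECONDITION & SPEC =====
def Spec_move_T (H : Int × Int) (T : Int × Int) (out : Option (Int × Int)) : Prop := out = move_T_alt H T
instance (H : Int × Int) (T : Int × Int) (out : Option (Int × Int)) : Decidable (Spec_move_T H T out) := by unfold Spec_move_T; infer_instance

-- ===== CLAIM (what is proved, stated in full; the proofs are below) =====
def Claim_equal_move_T : Prop := ∀ (H : Int × Int) (T : Int × Int), Dom_move_T H T → Spec_move_T H T (move_T H T)

-- ===== LEMMAS AND PROOFS =====
theorem map_addTuples_shift (hx hy a b : Int) (L : List (Int × Int)) :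
    L.map (addTuples (hx + a, hy + b)) =
      (L.map (addTuples (hx, hy))).map (fun p => (p.1 + a, p.2 + b)) := by
  rw [List.map_map]
  apply List.map_congr_left
  intro v _
  simp only [Function.comp, addTuples, Prod.mk.injEq]
  constructor <;> ring

theorem mem_map_shift (x y a b : Int) (L : List (Int × Int)) :
    ((x + a, y + b) ∈ L.map (fun p => (p.1 + a, p.2 + b))) ↔ (x, y) ∈ L := by
  simp only [List.mem_map, Prod.mk.injEq, Prod.ext_iff]
  constructor
  · rintro ⟨⟨p, q⟩, hm, h1, h2⟩
    have hp : p = x := by omega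
    have hq : q = y := by omega
    subst hp; subst hq; exact hm
  · intro h; exact ⟨(x, y), h, rfl, rfl⟩

theorem moveLoop_shift (tx ty a b : Int) (cands target : List (Int × Int)) :
    moveLoop (tx + a, ty + b) cands (target.map (fun p => (p.1 + a, p.2 + b))) =
      (moveLoop (tx, ty) cands target).map (fun p => (p.1 + a, p.2 + b)) := by
  induction cands with
  | nil => rfl
  | cons v rest ih =>
      simp only [moveLoop]
      have h1 : addTuples (tx + a, ty + b) v = ((tx + v.1) + a, (ty + v.2) + b) := by
        simp only [addTuples, Prod.mk.injEq]; constructor <;> ring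
      rw [h1]
      by_cases h : (tx + v.1, ty + v.2) ∈ target
      · rw [if_pos ((mem_map_shift (tx + v.1) (ty + v.2) a b target).mpr h),
          if_pos (show addTuples (tx, ty) v ∈ target from h)]
        rfl
      · rw [if_neg (fun hc => h ((mem_map_shift (tx + v.1) (ty + v.2) a b target).mp hc)),
          if_neg (show addTuples (tx, ty) v ∉ target from h)]
        exact ih

theorem move_T_shift (hx hy tx ty a b : Int) :
    move_T (hx + a, hy + b) (tx + a, ty + b) =
      (move_T (hx, hy) (tx, ty)).map (fun p => (p.1 + a, p.2 + b)) := by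
  unfold move_T
  simp only [map_addTuples_shift, moveLoop_shift, mem_map_shift]
  by_cases h : (tx, ty) ∈
      ([((1:Int),(1:Int)),(1,-1),(-1,1),(-1,-1)] ++ [((0:Int),(1:Int)),(0,-1),(-1,0),(1,0),(0,0)]).map
        (addTuples (hx, hy))
  · rw [if_pos h, if_pos h]; rfl
  · rw [if_neg h, if_neg h]
    cases moveLoop (tx, ty)
        ([((0:Int),(1:Int)),(0,-1),(-1,0),(1,0),(0,0)] ++ [((1:Int),(1:Int)),(1,-1),(-1,1),(-1,-1)])
        ([((0:Int),(1:Int)),(0,-1),(-1,0),(1,0),(0,0)].map (addTuples (hx, hy))) <;> rfl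

theorem move_T_alt_shift (hx hy tx ty a b : Int) :
    move_T_alt (hx + a, hy + b) (tx + a, ty + b) =
      (move_T_alt (hx, hy) (tx, ty)).map (fun p => (p.1 + a, p.2 + b)) := by
  simp only [move_T_alt]
  have e1 : hx + a - (tx + a) = hx - tx := by ring
  have e2 : hy + b - (ty + b) = hy - ty := by ring
  rw [e1, e2]
  split_ifs <;>
    simp only [Option.map_some, Option.map_none, Option.some.injEq, Prod.mk.injEq] <;>
    first | rfl | (constructor <;> ring)

theorem center_table :
    (([-2,-1,0,1,2] : List Int).all fun d1 =>
      ([-2,-1,0,1,2] : List Int).all fun d2 =>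
        move_T (d1, d2) (0, 0) == move_T_alt (d1, d2) (0, 0)) = true := by decide

theorem moveLoop_far_none (d1 d2 : Int) (h : 3 ≤ d1 ∨ d1 ≤ -3 ∨ 3 ≤ d2 ∨ d2 ≤ -3)
    (cands L : List (Int × Int))
    (hc : ∀ v ∈ cands, -1 ≤ v.1 ∧ v.1 ≤ 1 ∧ -1 ≤ v.2 ∧ v.2 ≤ 1)
    (hL : ∀ w ∈ L, -1 ≤ w.1 ∧ w.1 ≤ 1 ∧ -1 ≤ w.2 ∧ w.2 ≤ 1) :
    moveLoop (0, 0) cands (L.map (addTuples (d1, d2))) = none := by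
  induction cands with
  | nil => rfl
  | cons v rest ih =>
      simp only [moveLoop]
      rw [if_neg]
      · exact ih fun w hw => hc w (List.mem_cons_of_mem _ hw)
      · intro hmem
        rw [List.mem_map] at hmem
        obtain ⟨w, hw, he⟩ := hmem
        have h1 := hc v (List.mem_cons_self ..)
        have h2 := hL w hw
        rw [addTuples, addTuples, Prod.ext_iff] at he
        simp only at he
        omega

theorem surrounds_far_not_mem (d1 d2 : Int) (h : 3 ≤ d1 ∨ d1 ≤ -3 ∨ 3 ≤ d2 ∨ d2 ≤ -3)
    (L : List (Int × Int)) (hL : ∀ w ∈ L, -1 ≤ w.1 ∧ w.1 ≤ 1 ∧ -1 ≤ w.2 ∧ w.2 ≤ 1) :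
    ((0 : Int), (0 : Int)) ∉ L.map (addTuples (d1, d2)) := by
  intro hmem
  rw [List.mem_map] at hmem
  obtain ⟨w, hw, he⟩ := hmem
  have h2 := hL w hw
  rw [addTuples, Prod.ext_iff] at he
  simp only at he
  omega

theorem move_T_center (d1 d2 : Int) : move_T (d1, d2) (0, 0) = move_T_alt (d1, d2) (0, 0) := by
  by_cases h : -2 ≤ d1 ∧ d1 ≤ 2 ∧ -2 ≤ d2 ∧ d2 ≤ 2
  · obtain ⟨ha, hb, hc, hd⟩ := h
    have htab := center_table
    simp only [List.all_cons, List.all_nil, Bool.and_eq_true, beq_iff_eq, and_true] at htab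
    interval_cases d1 <;> interval_cases d2 <;> tauto
  · have hfar : 3 ≤ d1 ∨ d1 ≤ -3 ∨ 3 ≤ d2 ∨ d2 ≤ -3 := by omega
    have hB : move_T_alt (d1, d2) (0, 0) = none := by
      simp only [move_T_alt, sub_zero, absI]
      rw [if_neg, if_neg] <;> (split_ifs <;> omega)
    rw [hB]
    simp only [move_T]
    rw [if_neg (surrounds_far_not_mem d1 d2 hfar _ (by decide)),
      moveLoop_far_none d1 d2 hfar _ _ (by decide) (by decide),
      moveLoop_far_none d1 d2 hfar _ _ (by decide) (by decide)]

theorem move_T_eq_alt (H T : Int × Int) : move_T H T = move_T_alt H T := by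
  obtain ⟨hx, hy⟩ := H
  obtain ⟨tx, ty⟩ := T
  have eH : (hx, hy) = ((hx - tx) + tx, (hy - ty) + ty) := by
    simp only [Prod.mk.injEq]; constructor <;> ring
  have eT : (tx, ty) = ((0 : Int) + tx, (0 : Int) + ty) := by
    simp only [Prod.mk.injEq]; constructor <;> ring
  rw [eH, eT, move_T_shift, move_T_alt_shift, move_T_center]

-- ===== VERDICT (by name: the statement is the Claim_ definition above) =====
theorem move_T_spec : Claim_equal_move_T := by
  intro H T _
  unfold Spec_move_T
  exact move_T_eq_alt H T
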